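-- pv_equiv track=rewrite | github.com/fisjac/LeetCode | Hackerrank/chess_tournament.py | getPotentialOfWinner
-- ===== SOURCE A (Python) =====
-- from collections import deque
--
-- def getPotentialOfWinner(potential, k):
--   if k > len(potential):
--     return max(potential)
--
--   queue = deque(potential)
--   wins = 0
--   while wins < k:
--     left = queue.popleft()
--     right = queue.popleft()
--     if left > right:
--       wins += 1
--       queue.appendleft(left)
--       queue.append(right)
--     else:
--       wins = 1
--       queue.appendleft(right)
--       queue.append(left)
--   return queue[0]
-- ===== SOURCE B (Python) =====
-- def getPotentialOfWinner(potential, k):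
--     # Single forward pass: a running champion with a consecutive-win counter.
--     # Losers never need re-queueing: if the scan ends before k wins, the final
--     # champion holds the maximum value and would win every later round anyway.
--     if k > len(potential):
--         return max(potential)
--     champion = potential[0]
--     if k <= 0:
--         return champion
--     wins = 0
--     for x in potential[1:]:
--         if champion > x:
--             wins += 1
--         else:
--             champion = x
--             wins = 1
--         if wins == k:
--             return champion
--     return champion
-- ===== Notes on version B (the rewrite author's own statement) =====
-- stated objective: simpler
-- what changed: Replaces the deque simulation that re-queues every loser and can loop for many laps (or forever when the maximum is duplicated and k is large) with a single forward scan tracking a running champion and consecutive-win count, returning the final champion (the maximum) when the scan ends; intended as faster (O(n) single pass, and it terminates where A spins), but a timing run could not confirm a ratio because A does not finish on the large inputs.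
import Mathlib
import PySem

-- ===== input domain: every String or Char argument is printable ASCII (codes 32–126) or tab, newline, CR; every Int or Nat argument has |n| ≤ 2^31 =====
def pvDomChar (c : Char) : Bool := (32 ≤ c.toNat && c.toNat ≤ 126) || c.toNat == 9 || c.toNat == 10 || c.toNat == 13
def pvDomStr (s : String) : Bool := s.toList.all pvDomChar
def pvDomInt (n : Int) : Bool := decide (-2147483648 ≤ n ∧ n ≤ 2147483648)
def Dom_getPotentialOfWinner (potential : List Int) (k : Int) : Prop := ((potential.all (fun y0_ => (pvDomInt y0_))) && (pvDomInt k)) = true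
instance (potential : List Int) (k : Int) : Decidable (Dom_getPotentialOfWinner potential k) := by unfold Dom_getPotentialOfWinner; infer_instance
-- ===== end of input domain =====

-- B replaces A's deque simulation (which re-queues every loser and can loop for many
-- laps, or forever) by one forward scan keeping a running champion and win counter.

-- ===== PORT A =====
-- The Python while-loop is not structurally terminating (A diverges on some inputs,
-- which Pre_ excludes), so it is ported with a fuel parameter; the fuel chosen in
-- getPotentialOfWinner is proven sufficient on every input satisfying Pre_.
-- 'none' is exactly where the loop body raises IndexError (queue shorter than 2)
-- or where the fuel runs out (Python diverges there; excluded by Pre_).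
def loopA (k : Int) (f : Nat) (q : List Int) (wins : Int) : Option Int :=
    if wins < k then
      match f, q with
      | f' + 1, left :: right :: rest =>
          if right < left then loopA k f' (left :: (rest ++ [right])) (wins + 1)
          else loopA k f' (right :: (rest ++ [left])) 1
      | _, _ => none
    else q.head?   -- return queue[0]

-- max(potential) = PySem.List.max? potential id; .getD 0 is the ValueError case
-- (empty list), unreachable under Pre_; likewise the fuel-exhaustion default.
def getPotentialOfWinner (potential : List Int) (k : Int) : Int :=
  if (potential.length : Int) < k then (PySem.List.max? potential (fun y => y)).getD 0
  else (loopA k (2 * potential.length + k.toNat) potential 0).getD 0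

-- ===== PORT B =====
-- the for-loop of Source B: champion/wins updates, early return when wins == k
def altScan (k : Int) : List Int → Int → Int → Int
  | [], c, _ => c
  | x :: t, c, w =>
      let c' := if x < c then c else x
      let w' := if x < c then w + 1 else 1
      if w' = k then c' else altScan k t c' w'

def getPotentialOfWinner_alt (potential : List Int) (k : Int) : Int :=
  if (potential.length : Int) < k then (PySem.List.max? potential (fun y => y)).getD 0
  else
    match potential with
    | [] => 0          -- potential[0] raises IndexError here; unreachable under Pre_
    | c :: rest => if k ≤ 0 then c else altScan k rest c 0

-- ===== PRECONDITION & SPEC =====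
-- the value max(potential) computes (0 only for the empty list, excluded by Pre_)
def maxVal : List Int → Int
  | [] => 0
  | x :: t => t.foldl max x

-- the cyclic "ring" of challengers once the first maximum has become champion:
-- the elements after the first occurrence of the maximum, then those before it
def ring0 (p : List Int) : List Int :=
  p.drop (p.idxOf (maxVal p) + 1) ++ p.take (p.idxOf (maxVal p))

-- Pre_ excludes exactly the inputs where Python A does NOT return a value:
--  * potential = []                      (max/deque-pop raises),
--  * length 1 with k = 1                 (popping two elements raises IndexError),
--  * 1 ≤ k ≤ length with a duplicated maximum and no stretch of k-1 consecutive
--    sub-maximal challengers right after a maximum in the cyclic ring — there the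
--    win counter can never reach k and A loops forever.
def Pre_getPotentialOfWinner (potential : List Int) (k : Int) : Prop :=
  potential ≠ [] ∧ ¬(potential.length = 1 ∧ k = 1) ∧
  (k ≤ 0 ∨ (potential.length : Int) < k ∨
   potential.count (maxVal potential) = 1 ∨
   ∃ d < (ring0 potential).length,
     (ring0 potential)[d]? = some (maxVal potential) ∧
     ∀ j, 1 ≤ j → j ≤ (k - 1).toNat →
       (ring0 potential)[(d + j) % (ring0 potential).length]? ≠ some (maxVal potential))

instance (potential : List Int) (k : Int) : Decidable (Pre_getPotentialOfWinner potential k) := by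
  unfold Pre_getPotentialOfWinner; infer_instance

def pvWitness_getPotentialOfWinner : List Int × Int := ([3, 1, 2], 2)

def Spec_getPotentialOfWinner (potential : List Int) (k : Int) (out : Int) : Prop := out = getPotentialOfWinner_alt potential k
instance (potential : List Int) (k : Int) (out : Int) : Decidable (Spec_getPotentialOfWinner potential k out) := by unfold Spec_getPotentialOfWinner; infer_instance

-- ===== CLAIM (what is proved, stated in full; the proofs are below) =====
def Claim_equal_getPotentialOfWinner : Prop := ∀ (potential : List Int) (k : Int), Dom_getPotentialOfWinner potential k → Pre_getPotentialOfWinner potential k → Spec_getPotentialOfWinner potential k (getPotentialOfWinner potential k)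

-- ===== LEMMAS AND PROOFS =====

theorem loopA_stop (k : Int) (f : Nat) (q : List Int) (w : Int) (h : ¬ w < k) :
    loopA k f q w = q.head? := by
  rw [loopA.eq_def, if_neg h]

theorem loopA_win (k : Int) (f : Nat) (c x : Int) (t : List Int) (w : Int)
    (hw : w < k) (hx : x < c) :
    loopA k (f + 1) (c :: x :: t) w = loopA k f (c :: (t ++ [x])) (w + 1) := by
  rw [loopA.eq_def, if_pos hw]; exact if_pos hx

theorem loopA_tie (k : Int) (f : Nat) (c x : Int) (t : List Int) (w : Int)
    (hw : w < k) (hx : ¬ x < c) :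
    loopA k (f + 1) (c :: x :: t) w = loopA k f (x :: (t ++ [c])) 1 := by
  rw [loopA.eq_def, if_pos hw]; exact if_neg hx

-- max facts
theorem le_maxVal (p : List Int) : ∀ y ∈ p, y ≤ maxVal p := by
  cases p with
  | nil => intro y hy; cases hy
  | cons x t =>
    intro y hy
    rcases List.mem_cons.mp hy with h | h
    · subst h; exact (PySem.List.le_foldl_max t y).1
    · exact (PySem.List.le_foldl_max t x).2 y h

theorem maxVal_mem (p : List Int) (hp : p ≠ []) : maxVal p ∈ p := by
  cases p with
  | nil => exact absurd rfl hp
  | cons x t =>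
    rcases PySem.List.foldl_max_mem t x with h | h
    · rw [maxVal, h]; exact List.mem_cons_self
    · exact List.mem_cons_of_mem x h

-- first-occurrence split
theorem idxOf_split (M : Int) (p : List Int) (hM : M ∈ p) :
    p.take (p.idxOf M) ++ M :: p.drop (p.idxOf M + 1) = p ∧
    ∀ y ∈ p.take (p.idxOf M), y ≠ M := by
  induction p with
  | nil => cases hM
  | cons a t ih =>
    by_cases ha : a = M
    · subst ha
      simp [List.idxOf_cons_self]
    · have hM' : M ∈ t := by
        rcases List.mem_cons.mp hM with h | h
        · exact absurd h.symm ha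
        · exact h
      have hidx : (a :: t).idxOf M = t.idxOf M + 1 := by
        simp [ha]
      rcases ih hM' with ⟨h1, h2⟩
      constructor
      · rw [hidx]; simpa using h1
      · rw [hidx]
        intro y hy
        rcases List.mem_cons.mp (by simpa using hy) with h | h
        · subst h; exact ha
        · exact h2 y h

-- patterns: which ring slots hold the maximum
def pats (M : Int) (l : List Int) : List Bool := l.map (fun y => decide (y = M))

-- aligned run: slot d holds the maximum, the next K1 cyclic slots do not
def ARB (K1 : Nat) (b : List Bool) : Prop :=
  ∃ d, d < b.length ∧ b[d]? = some true ∧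
    ∀ j, 1 ≤ j → j ≤ K1 → b[(d + j) % b.length]? = some false

theorem rot_get (α : Type) (x : α) (t : List α) (i : Nat) (hi : i < t.length + 1) :
    (t ++ [x])[i]? = (x :: t)[(i + 1) % (t.length + 1)]? := by
  by_cases h : i < t.length
  · rw [List.getElem?_append_left h, Nat.mod_eq_of_lt (by omega), List.getElem?_cons_succ]
  · have hi' : i = t.length := by omega
    subst hi'
    rw [List.getElem?_append_right (le_refl _), Nat.sub_self, Nat.mod_self]
    simp

theorem rotate_get (α : Type) (b : List α) (r i : Nat) (hr : r ≤ b.length)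
    (hi : i < b.length) :
    (b.drop r ++ b.take r)[i]? = b[(i + r) % b.length]? := by
  by_cases h : i < b.length - r
  · rw [List.getElem?_append_left (by simpa using h), List.getElem?_drop,
      Nat.mod_eq_of_lt (by omega)]
    congr 1; omega
  · have hlen : (b.drop r).length = b.length - r := by simp
    rw [List.getElem?_append_right (by omega), hlen,
      List.getElem?_take_of_lt (by omega)]
    have hm : (i + r) % b.length = i - (b.length - r) := by
      rw [Nat.mod_eq_sub_mod (by omega), Nat.mod_eq_of_lt (by omega)]
      omega
    rw [hm]

theorem ARB_rotate (K1 : Nat) (b : List Bool) (r : Nat) (hr : r ≤ b.length)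
    (h : ARB K1 b) : ARB K1 (b.drop r ++ b.take r) := by
  obtain ⟨d, hd, htrue, hrun⟩ := h
  have hL : 0 < b.length := by omega
  have hlen : (b.drop r ++ b.take r).length = b.length := by simp; omega
  refine ⟨(d + (b.length - r)) % b.length, ?_, ?_, ?_⟩
  · rw [hlen]; exact Nat.mod_lt _ hL
  · rw [rotate_get Bool b r _ hr (Nat.mod_lt _ hL)]
    have e1 : ((d + (b.length - r)) % b.length + r) % b.length = (d + (b.length - r) + r) % b.length :=
      Nat.mod_add_mod _ _ _
    have e2 : d + (b.length - r) + r = d + b.length := by omega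
    rw [e1, e2, Nat.add_mod_right, Nat.mod_eq_of_lt hd]
    exact htrue
  · intro j hj1 hj2
    rw [hlen, rotate_get Bool b r _ hr (Nat.mod_lt _ hL)]
    have e1 : ((d + (b.length - r)) % b.length + j) % b.length = (d + (b.length - r) + j) % b.length :=
      Nat.mod_add_mod _ _ _
    have e2 : ((d + (b.length - r) + j) % b.length + r) % b.length = (d + (b.length - r) + j + r) % b.length :=
      Nat.mod_add_mod _ _ _
    have e3 : d + (b.length - r) + j + r = d + j + b.length := by omega
    rw [e1, e2, e3, Nat.add_mod_right]
    exact hrun j hj1 hj2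

-- the streak: champion c beats the ys one after the other and reaches k wins
theorem streak (k : Int) (ys : List Int) : ∀ zs c w f, (∀ y ∈ ys, y < c) →
    k ≤ w + ys.length → (k - w).toNat ≤ f →
    loopA k f (c :: (ys ++ zs)) w = some c := by
  induction ys with
  | nil =>
    intro zs c w f _ hk _
    have hw : ¬ w < k := by simp at hk; omega
    rw [loopA_stop k f _ w hw]; rfl
  | cons y t ih =>
    intro zs c w f hmem hk hf
    by_cases hw : w < k
    · cases f with
      | zero => exfalso; omega
      | succ f' =>
        have hy : y < c := hmem y List.mem_cons_self
        have : (y :: t) ++ zs = y :: (t ++ zs) := rfl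
        rw [this, loopA_win k f' c y (t ++ zs) w hw hy,
          List.append_assoc]
        refine ih (zs ++ [y]) c (w + 1) f' (fun z hz => hmem z (List.mem_cons_of_mem y hz)) ?_ (by omega)
        simp at hk ⊢; omega
    · rw [loopA_stop k f _ w hw]; rfl

-- unique maximum as champion: every challenger loses, wins grows to k
theorem allbeat (k : Int) : ∀ f r c w, (∀ y ∈ r, y < c) → r ≠ [] →
    (k - w).toNat ≤ f → loopA k f (c :: r) w = some c := by
  intro f
  induction f with
  | zero =>
    intro r c w _ _ hf
    have hw : ¬ w < k := by omega
    rw [loopA_stop k 0 _ w hw]; rfl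
  | succ f' ih =>
    intro r c w hmem hne hf
    by_cases hw : w < k
    · cases r with
      | nil => exact absurd rfl hne
      | cons y t =>
        have hy : y < c := hmem y List.mem_cons_self
        rw [loopA_win k f' c y t w hw hy]
        refine ih (t ++ [y]) c (w + 1) ?_ (by simp) (by omega)
        intro z hz
        rcases List.mem_append.mp hz with h | h
        · exact hmem z (List.mem_cons_of_mem y h)
        · rw [List.mem_singleton.mp h]; exact hy
    · rw [loopA_stop k _ _ w hw]; rfl

-- duplicated maximum: reaching the aligned gap of k-1 sub-maximal challengers
theorem stable (k M : Int) (hk : 1 ≤ k) : ∀ d f r c w, c = M → (∀ y ∈ r, y ≤ M) →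
    d < r.length → (pats M r)[d]? = some true →
    (∀ j, 1 ≤ j → j ≤ (k - 1).toNat → (pats M r)[(d + j) % r.length]? = some false) →
    d + (k - 1).toNat + 1 ≤ f →
    loopA k f (c :: r) w = some M := by
  intro d
  induction d with
  | zero =>
    intro f r c w hc hmem hd htrue hrun hf
    by_cases hw : w < k
    · cases r with
      | nil => simp at hd
      | cons x t =>
        have hx : x = M := by
          have : (pats M (x :: t))[0]? = some (decide (x = M)) := by simp [pats]
          rw [this] at htrue
          simpa using htrue
        have hL : (x :: t).length = t.length + 1 := rfl
        have hK1 : (k - 1).toNat < (x :: t).length := by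
          by_contra hcon
          have h1 : 1 ≤ (x :: t).length := by simp
          have := hrun ((x :: t).length) (by omega) (by omega)
          rw [Nat.zero_add, Nat.mod_self] at this
          rw [htrue] at this
          simp at this
        cases f with
        | zero => omega
        | succ f' =>
          have hnlt : ¬ x < c := by rw [hc, hx]; exact lt_irrefl M
          rw [loopA_tie k f' c x t w hw hnlt]
          have hsplit : t ++ [c] = t.take (k - 1).toNat ++ (t.drop (k - 1).toNat ++ [c]) := by
            rw [← List.append_assoc, List.take_append_drop]
          rw [hsplit]
          have hlen : (t.take (k - 1).toNat).length = (k - 1).toNat := by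
            simp; omega
          have hys : ∀ y ∈ t.take (k - 1).toNat, y < x := by
            intro y hy
            obtain ⟨i, hi, hval⟩ := List.mem_iff_getElem.mp hy
            rw [hlen] at hi
            have hit : i < t.length := by omega
            have hgv : y = t[i] := by
              rw [← hval]; exact List.getElem_take
            have hne : y ≠ M := by
              have hr := hrun (i + 1) (by omega) (by omega)
              have hmod : (0 + (i + 1)) % (x :: t).length = i + 1 := by
                rw [Nat.zero_add, Nat.mod_eq_of_lt (by omega)]
              rw [hmod] at hr
              have : (pats M (x :: t))[i + 1]? = some (decide (t[i] = M)) := by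
                unfold pats
                rw [List.getElem?_map, List.getElem?_cons_succ, List.getElem?_eq_getElem hit]
                rfl
              rw [this] at hr
              simp at hr
              rw [hgv]; exact hr
            have hle : y ≤ M := hmem y (List.mem_cons_of_mem x (List.mem_of_mem_take hy))
            rw [hx]; omega
          have := streak k (t.take (k - 1).toNat) (t.drop (k - 1).toNat ++ [c]) x 1 f' hys
            (by rw [hlen]; omega) (by omega)
          rw [this, hx]
    · rw [loopA_stop k f _ w hw, hc]; rfl
  | succ d ih =>
    intro f r c w hc hmem hd htrue hrun hf
    by_cases hw : w < k
    · cases r with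
      | nil => simp at hd
      | cons x t =>
        have hL : (x :: t).length = t.length + 1 := rfl
        have hdt : d < t.length := by simp at hd; omega
        have hxle : x ≤ M := hmem x List.mem_cons_self
        cases f with
        | zero => omega
        | succ f' =>
          -- both branches lead to champion of value M and ring t ++ [y] with pat y = pat x
          have key : ∀ (c' : Int) (y : Int), c' = M → decide (y = M) = decide (x = M) → y ≤ M →
              ∀ w', loopA k f' (c' :: (t ++ [y])) w' = some M := by
            intro c' y hc' hpy hyle w'
            have hlen' : (t ++ [y]).length = t.length + 1 := by simp
            have hrot : ∀ i, i < t.length + 1 →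
                (pats M (t ++ [y]))[i]? = (pats M (x :: t))[(i + 1) % (t.length + 1)]? := by
              intro i hi
              have h1 : pats M (t ++ [y]) = pats M t ++ [decide (y = M)] := by simp [pats]
              have h2 : pats M (x :: t) = decide (x = M) :: pats M t := by simp [pats]
              have hpl : (pats M t).length = t.length := by simp [pats]
              have hre := rot_get Bool (decide (x = M)) (pats M t) i (by rw [hpl]; omega)
              rw [hpl] at hre
              rw [h1, h2, hpy, hre]
            refine ih f' (t ++ [y]) c' w' hc' ?_ (by rw [hlen']; omega) ?_ ?_ (by omega)
            · intro z hz
              rcases List.mem_append.mp hz with h | h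
              · exact hmem z (List.mem_cons_of_mem x h)
              · rw [List.mem_singleton.mp h]; exact hyle
            · rw [hrot d (by omega), Nat.mod_eq_of_lt (by omega)]
              exact htrue
            · intro j hj1 hj2
              rw [hlen', hrot ((d + j) % (t.length + 1)) (Nat.mod_lt _ (by omega))]
              have e1 : ((d + j) % (t.length + 1) + 1) % (t.length + 1) = (d + j + 1) % (t.length + 1) :=
                Nat.mod_add_mod _ _ _
              have e2 : d + j + 1 = d + 1 + j := by omega
              rw [e1, e2]
              exact hrun j hj1 hj2
          by_cases hlt : x < c
          · rw [loopA_win k f' c x t w hw hlt]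
            exact key c x hc rfl hxle (w + 1)
          · rw [loopA_tie k f' c x t w hw hlt]
            have hxM : x = M := by rw [hc] at hlt; omega
            refine key x c hxM ?_ (by rw [hc]) 1
            rw [hxM, hc]
    · rw [loopA_stop k f _ w hw, hc]; rfl

-- B's scan with full bookkeeping (final champion, wins, and the loser list,
-- which is exactly what A's queue holds behind the champion)
def scanE (k : Int) : List Int → Int → Int → Sum Int (Int × Int × List Int)
  | [], c, w => .inr (c, w, [])
  | x :: t, c, w =>
      let c' := if x < c then c else x
      let w' := if x < c then w + 1 else 1
      if k ≤ w' then .inl c'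
      else
        match scanE k t c' w' with
        | .inl r => .inl r
        | .inr (ce, we, ls) => .inr (ce, we, (if x < c then x else c) :: ls)

theorem altScan_eq_scanE (k : Int) (hk : 1 ≤ k) : ∀ t c w, w < k →
    altScan k t c w = (match scanE k t c w with
      | .inl c' => c'
      | .inr (ce, _, _) => ce) := by
  intro t
  induction t with
  | nil =>
    intro c w _
    simp [altScan, scanE]
  | cons x t ih =>
    intro c w hw
    simp only [altScan, scanE]
    by_cases heq : (if x < c then w + 1 else 1) = k
    · rw [if_pos heq, if_pos (le_of_eq heq.symm)]
    · rw [if_neg heq]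
      have hlt : (if x < c then w + 1 else 1) < k := by
        by_cases hxc : x < c
        · rw [if_pos hxc] at heq ⊢; omega
        · rw [if_neg hxc] at heq ⊢; omega
      rw [if_neg (not_le.mpr hlt)]
      rw [ih _ _ hlt]
      rcases hsc : scanE k t (if x < c then c else x) (if x < c then w + 1 else 1) with r | ⟨ce', we', ls'⟩ <;>
        rfl

-- lockstep: A's loop follows B's scan challenger by challenger
theorem lock (k : Int) : ∀ t c w acc f, t.length ≤ f → w < k →
    loopA k f (c :: (t ++ acc)) w =
      (match scanE k t c w with
       | .inl c' => some c'
       | .inr (ce, we, ls) => loopA k (f - t.length) (ce :: (acc ++ ls)) we) := by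
  intro t
  induction t with
  | nil =>
    intro c w acc f _ _
    simp [scanE]
  | cons x t ih =>
    intro c w acc f hf hw
    cases f with
    | zero => simp at hf
    | succ f' =>
      have hf' : t.length ≤ f' := by simp at hf; omega
      have hq : (x :: t) ++ acc = x :: (t ++ acc) := rfl
      simp only [scanE]
      by_cases hxc : x < c
      · rw [hq, loopA_win k f' c x (t ++ acc) w hw hxc, List.append_assoc]
        simp only [if_pos hxc]
        by_cases hk2 : k ≤ w + 1
        · rw [if_pos hk2]
          rw [loopA_stop k f' _ (w + 1) (by omega)]
          rfl
        · rw [if_neg hk2]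
          rw [ih c (w + 1) (acc ++ [x]) f' hf' (by omega)]
          rcases hsc : scanE k t c (w + 1) with r | ⟨ce', we', ls'⟩
          · rfl
          · simp [Nat.succ_sub_succ]
      · rw [hq, loopA_tie k f' c x (t ++ acc) w hw hxc, List.append_assoc]
        simp only [if_neg hxc]
        by_cases hk2 : k ≤ (1 : Int)
        · rw [if_pos hk2]
          rw [loopA_stop k f' _ 1 (by omega)]
          rfl
        · rw [if_neg hk2]
          rw [ih x 1 (acc ++ [c]) f' hf' (by omega)]
          rcases hsc : scanE k t x 1 with r | ⟨ce', we', ls'⟩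
          · rfl
          · simp [Nat.succ_sub_succ]

-- scanE bookkeeping facts
theorem scanE_inr_champion (k : Int) : ∀ t c w ce we ls,
    scanE k t c w = .inr (ce, we, ls) → ce = t.foldl max c := by
  intro t
  induction t with
  | nil =>
    intro c w ce we ls h
    simp [scanE] at h
    simp [h.1]
  | cons x t ih =>
    intro c w ce we ls h
    simp only [scanE] at h
    by_cases hk2 : k ≤ (if x < c then w + 1 else 1)
    · rw [if_pos hk2] at h; cases h
    · rw [if_neg hk2] at h
      rcases hsc : scanE k t (if x < c then c else x) (if x < c then w + 1 else 1) with r | ⟨ce', we', ls'⟩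
      · rw [hsc] at h; cases h
      · rw [hsc] at h
        cases h
        have hmax : (if x < c then c else x) = max c x := by
          rcases lt_or_ge x c with hx | hx
          · rw [if_pos hx, max_eq_left hx.le]
          · rw [if_neg (by omega), max_eq_right hx]
        rw [List.foldl_cons, ← hmax]
        exact ih _ _ _ _ _ hsc

theorem scanE_inr_perm (k : Int) : ∀ t c w ce we ls,
    scanE k t c w = .inr (ce, we, ls) → (ce :: ls).Perm (c :: t) := by
  intro t
  induction t with
  | nil =>
    intro c w ce we ls h
    simp [scanE] at h
    rw [h.1, h.2.2]
  | cons x t ih =>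
    intro c w ce we ls h
    simp only [scanE] at h
    by_cases hk2 : k ≤ (if x < c then w + 1 else 1)
    · rw [if_pos hk2] at h; cases h
    · rw [if_neg hk2] at h
      rcases hsc : scanE k t (if x < c then c else x) (if x < c then w + 1 else 1) with r | ⟨ce', we', ls'⟩
      · rw [hsc] at h; cases h
      · rw [hsc] at h
        rw [Sum.inr.injEq, Prod.mk.injEq, Prod.mk.injEq] at h
        obtain ⟨rfl, rfl, rfl⟩ := h
        have hperm := ih _ _ _ _ _ hsc
        by_cases hxc : x < c
        · rw [if_pos hxc] at hperm ⊢
          exact (List.Perm.swap x ce' ls').trans ((hperm.cons x).trans (List.Perm.swap c x t))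
        · rw [if_neg hxc] at hperm ⊢
          exact (List.Perm.swap c ce' ls').trans (hperm.cons c)

theorem scanE_inr_len (k : Int) : ∀ t c w ce we ls,
    scanE k t c w = .inr (ce, we, ls) → ls.length = t.length := by
  intro t
  induction t with
  | nil =>
    intro c w ce we ls h
    simp [scanE] at h
    simp [h.2.2]
  | cons x t ih =>
    intro c w ce we ls h
    simp only [scanE] at h
    by_cases hk2 : k ≤ (if x < c then w + 1 else 1)
    · rw [if_pos hk2] at h; cases h
    · rw [if_neg hk2] at h
      rcases hsc : scanE k t (if x < c then c else x) (if x < c then w + 1 else 1) with r | ⟨ce', we', ls'⟩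
      · rw [hsc] at h; cases h
      · rw [hsc] at h
        cases h
        simpa using ih _ _ _ _ _ hsc

theorem scanE_inr_w (k : Int) : ∀ t c w ce we ls,
    scanE k t c w = .inr (ce, we, ls) → 0 ≤ w → 0 ≤ we := by
  intro t
  induction t with
  | nil =>
    intro c w ce we ls h hw
    simp [scanE] at h
    omega
  | cons x t ih =>
    intro c w ce we ls h hw
    simp only [scanE] at h
    by_cases hk2 : k ≤ (if x < c then w + 1 else 1)
    · rw [if_pos hk2] at h; cases h
    · rw [if_neg hk2] at h
      rcases hsc : scanE k t (if x < c then c else x) (if x < c then w + 1 else 1) with r | ⟨ce', we', ls'⟩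
      · rw [hsc] at h; cases h
      · rw [hsc] at h
        cases h
        exact ih _ _ _ _ _ hsc (by split <;> omega)

theorem scanE_inr_pats_stable (k M : Int) : ∀ t c w ce we ls, c = M → (∀ y ∈ t, y ≤ M) →
    scanE k t c w = .inr (ce, we, ls) → pats M ls = pats M t := by
  intro t
  induction t with
  | nil =>
    intro c w ce we ls _ _ h
    simp [scanE] at h
    simp [h.2.2, pats]
  | cons x t ih =>
    intro c w ce we ls hc hmem h
    simp only [scanE] at h
    by_cases hk2 : k ≤ (if x < c then w + 1 else 1)
    · rw [if_pos hk2] at h; cases h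
    · rw [if_neg hk2] at h
      rcases hsc : scanE k t (if x < c then c else x) (if x < c then w + 1 else 1) with r | ⟨ce', we', ls'⟩
      · rw [hsc] at h; cases h
      · rw [hsc] at h
        rw [Sum.inr.injEq, Prod.mk.injEq, Prod.mk.injEq] at h
        obtain ⟨rfl, rfl, rfl⟩ := h
        have hmem' : ∀ y ∈ t, y ≤ M := fun y hy => hmem y (List.mem_cons_of_mem x hy)
        by_cases hxc : x < c
        · rw [if_pos hxc] at hsc ⊢
          have := ih _ _ _ _ _ hc hmem' hsc
          simp only [pats, List.map_cons] at this ⊢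
          rw [this]
        · rw [if_neg hxc] at hsc ⊢
          have hxM : x = M := by
            have := hmem x List.mem_cons_self
            omega
          have := ih _ _ _ _ _ hxM hmem' hsc
          simp only [pats, List.map_cons] at this ⊢
          rw [this, hc, hxM]

theorem scanE_inr_pats_rise (k M : Int) : ∀ u v c w ce we ls, c < M → (∀ y ∈ u, y ≠ M) →
    (∀ y ∈ u, y ≤ M) → (∀ y ∈ v, y ≤ M) →
    scanE k (u ++ M :: v) c w = .inr (ce, we, ls) →
    pats M ls = List.replicate (u.length + 1) false ++ pats M v := by
  intro u
  induction u with
  | nil =>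
    intro v c w ce we ls hc _ _ hv h
    simp only [List.nil_append, scanE] at h
    have hnlt : ¬ M < c := by omega
    simp only [if_neg hnlt] at h
    by_cases hk2 : k ≤ (1 : Int)
    · rw [if_pos hk2] at h; cases h
    · rw [if_neg hk2] at h
      rcases hsc : scanE k v M 1 with r | ⟨ce', we', ls'⟩
      · rw [hsc] at h; cases h
      · rw [hsc] at h
        rw [Sum.inr.injEq, Prod.mk.injEq, Prod.mk.injEq] at h
        obtain ⟨rfl, rfl, rfl⟩ := h
        have hps := scanE_inr_pats_stable k M v M 1 ce' we' ls' rfl hv hsc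
        simp only [pats, List.map_cons] at hps ⊢
        rw [hps]
        simp
        omega
  | cons a u ih =>
    intro v c w ce we ls hc hune hule hv h
    have haM : a < M := by
      have h1 := hune a List.mem_cons_self
      have h2 := hule a List.mem_cons_self
      omega
    simp only [List.cons_append, scanE] at h
    by_cases hk2 : k ≤ (if a < c then w + 1 else 1)
    · rw [if_pos hk2] at h; cases h
    · rw [if_neg hk2] at h
      rcases hsc : scanE k (u ++ M :: v) (if a < c then c else a) (if a < c then w + 1 else 1) with r | ⟨ce', we', ls'⟩
      · rw [hsc] at h; cases h
      · rw [hsc] at h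
        rw [Sum.inr.injEq, Prod.mk.injEq, Prod.mk.injEq] at h
        obtain ⟨rfl, rfl, rfl⟩ := h
        have hc' : (if a < c then c else a) < M := by split <;> omega
        have := ih v _ _ _ _ _ hc'
          (fun y hy => hune y (List.mem_cons_of_mem a hy))
          (fun y hy => hule y (List.mem_cons_of_mem a hy)) hv hsc
        simp only [pats, List.map_cons] at this ⊢
        rw [this]
        have hloser : (if a < c then a else c) < M := by split <;> omega
        have : decide ((if a < c then a else c) = M) = false := by
          simp; omega
        rw [this]
        simp [List.replicate_succ]

theorem pats_replicate (M : Int) : ∀ l : List Int, (∀ y ∈ l, y ≠ M) →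
    pats M l = List.replicate l.length false := by
  intro l
  induction l with
  | nil => intro _; rfl
  | cons a t ih =>
    intro h
    have ha : decide (a = M) = false := by simp; exact h a List.mem_cons_self
    simp only [pats, List.map_cons, List.length_cons, List.replicate_succ] at ih ⊢
    rw [ha, ih (fun y hy => h y (List.mem_cons_of_mem a hy))]

theorem pre_to_ARB (M : Int) (K1 : Nat) (l : List Int)
    (h : ∃ d < l.length, l[d]? = some M ∧
      ∀ j, 1 ≤ j → j ≤ K1 → l[(d + j) % l.length]? ≠ some M) :
    ARB K1 (pats M l) := by
  obtain ⟨d, hd, ht, hr⟩ := h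
  have hplen : (pats M l).length = l.length := by simp [pats]
  refine ⟨d, by rw [hplen]; exact hd, ?_, ?_⟩
  · unfold pats
    rw [List.getElem?_map, ht]
    simp
  · intro j hj1 hj2
    rw [hplen]
    have hL : 0 < l.length := by omega
    have hlt : (d + j) % l.length < l.length := Nat.mod_lt _ hL
    have hsome : l[(d + j) % l.length]? = some (l[(d + j) % l.length]) :=
      List.getElem?_eq_getElem hlt
    have hne : l[(d + j) % l.length] ≠ M := by
      intro hcon
      exact hr j hj1 hj2 (by rw [hsome, hcon])
    unfold pats
    rw [List.getElem?_map, hsome]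
    simp [hne]

-- ===== VERDICT (by name: the statement is the Claim_ definition above) =====
theorem getPotentialOfWinner_spec : Claim_equal_getPotentialOfWinner := by
  unfold Claim_equal_getPotentialOfWinner Spec_getPotentialOfWinner
  intro p k _ hpre
  obtain ⟨hne, hnot1, hdisj⟩ := hpre
  unfold getPotentialOfWinner getPotentialOfWinner_alt
  by_cases hbig : (p.length : Int) < k
  · rw [if_pos hbig, if_pos hbig]
  · rw [if_neg hbig, if_neg hbig]
    cases p with
    | nil => exact absurd rfl hne
    | cons c rest =>
      have hred : (match c :: rest with
          | [] => (0 : Int)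
          | c :: rest => if k ≤ 0 then c else altScan k rest c 0) =
          if k ≤ 0 then c else altScan k rest c 0 := rfl
      rw [hred]
      by_cases hk0 : k ≤ 0
      · rw [loopA_stop k _ _ 0 (by omega)]
        rw [if_pos hk0]
        rfl
      · rw [if_neg hk0]
        have hk : 1 ≤ k := by omega
        have hrne : rest ≠ [] := by
          intro hcon
          subst hcon
          apply hnot1
          constructor
          · rfl
          · simp at hbig; omega
        have hM : maxVal (c :: rest) = rest.foldl max c := rfl
        -- lockstep with B's scan
        have hlock := lock k rest c 0 [] (2 * (c :: rest).length + k.toNat)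
          (by simp [List.length_cons]; omega) (by omega)
        rw [List.append_nil] at hlock
        rw [hlock]
        rw [altScan_eq_scanE k hk rest c 0 (by omega)]
        rcases hsc : scanE k rest c 0 with r | ⟨ce, we, ls⟩
        · rfl
        · simp only [List.nil_append]
          have hce : ce = rest.foldl max c := scanE_inr_champion k rest c 0 ce we ls hsc
          have hceM : ce = maxVal (c :: rest) := by rw [hce, hM]
          have hperm := scanE_inr_perm k rest c 0 ce we ls hsc
          have hlsl : ls.length = rest.length := scanE_inr_len k rest c 0 ce we ls hsc
          have hwe0 : 0 ≤ we := scanE_inr_w k rest c 0 ce we ls hsc (by omega)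
          have hmemls : ∀ y ∈ ls, y ≤ maxVal (c :: rest) := by
            intro y hy
            have : y ∈ c :: rest := (hperm.mem_iff).mp (List.mem_cons_of_mem ce hy)
            exact le_maxVal (c :: rest) y this
          have hfuel : 2 * (c :: rest).length + k.toNat - rest.length = rest.length + 2 + k.toNat := by
            simp [List.length_cons]; omega
          rcases hdisj with h | h | h | h
          · omega
          · exact absurd h hbig
          · -- unique maximum: every challenger in the ring is strictly smaller
            have hcnt : (ce :: ls).count (maxVal (c :: rest)) = 1 := by
              rw [hperm.count_eq]; exact h
            have hlszero : ls.count (maxVal (c :: rest)) = 0 := by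
              rw [List.count_cons] at hcnt
              simp [hceM] at hcnt
              omega
            have hlt : ∀ y ∈ ls, y < ce := by
              intro y hy
              have hne' : y ≠ maxVal (c :: rest) := by
                intro hcon
                have := List.count_pos_iff.mpr (hcon ▸ hy)
                omega
              have := hmemls y hy
              rw [hceM]; omega
            rw [allbeat k _ ls ce we hlt
              (by intro hcon; rw [hcon] at hlsl; simp at hlsl; exact hrne (List.eq_nil_of_length_eq_zero hlsl.symm))
              (by rw [hfuel]; omega)]
            rfl
          · -- duplicated maximum: the aligned gap of k-1 sub-maximal challengers
            have hARring := pre_to_ARB (maxVal (c :: rest)) (k - 1).toNat (ring0 (c :: rest)) h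
            -- transport the aligned run from ring0 to the loser ring ls
            have hARls : ARB (k - 1).toNat (pats (maxVal (c :: rest)) ls) := by
              by_cases hcM : c = maxVal (c :: rest)
              · have hidx : (c :: rest).idxOf (maxVal (c :: rest)) = 0 := by
                  rw [← hcM]
                  exact List.idxOf_cons_self
                have hr0 : ring0 (c :: rest) = rest := by
                  unfold ring0
                  rw [hidx]
                  simp
                have hps := scanE_inr_pats_stable k (maxVal (c :: rest)) rest c 0 ce we ls
                  hcM (fun y hy => le_maxVal (c :: rest) y (List.mem_cons_of_mem c hy)) hsc
                rw [hr0] at hARring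
                rw [hps]
                exact hARring
              · have hclt : c < maxVal (c :: rest) := by
                  have := le_maxVal (c :: rest) c List.mem_cons_self
                  omega
                have hMrest : maxVal (c :: rest) ∈ rest := by
                  rcases List.mem_cons.mp (maxVal_mem (c :: rest) (by simp)) with hx | hx
                  · exact absurd hx.symm hcM
                  · exact hx
                obtain ⟨hsplit, hune⟩ := idxOf_split (maxVal (c :: rest)) rest hMrest
                set M := maxVal (c :: rest) with hMdef
                set i := rest.idxOf M with hidef
                set u' := rest.take i with hu'
                set v := rest.drop (i + 1) with hv
                have hidx : (c :: rest).idxOf M = i + 1 := by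
                  have hb : (c == M) = false := by simpa using hcM
                  rw [List.idxOf_cons, hb, cond_false, hidef]
                have hr0 : ring0 (c :: rest) = v ++ c :: u' := by
                  unfold ring0
                  rw [← hMdef, hidx]
                  simp [hv, hu']
                have hvle : ∀ y ∈ v, y ≤ M := fun y hy =>
                  le_maxVal (c :: rest) y (List.mem_cons_of_mem c (List.mem_of_mem_drop (hv ▸ hy)))
                have hu'le : ∀ y ∈ u', y ≤ M := fun y hy =>
                  le_maxVal (c :: rest) y (List.mem_cons_of_mem c (List.mem_of_mem_take hy))
                have hsc' : scanE k (u' ++ M :: v) c 0 = .inr (ce, we, ls) := by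
                  rw [hsplit]; exact hsc
                have hps := scanE_inr_pats_rise k M u' v c 0 ce we ls hclt hune hu'le hvle hsc'
                have hpr : pats M (ring0 (c :: rest)) =
                    pats M v ++ List.replicate (u'.length + 1) false := by
                  rw [hr0]
                  unfold pats
                  rw [List.map_append]
                  congr 1
                  have : ∀ y ∈ c :: u', y ≠ M := by
                    intro y hy
                    rcases List.mem_cons.mp hy with hx | hx
                    · rw [hx]; exact hcM
                    · exact hune y hx
                  have := pats_replicate M (c :: u') this
                  simpa [pats] using this
                have hrot : pats M ls =
                    (pats M (ring0 (c :: rest))).drop (pats M v).length ++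
                    (pats M (ring0 (c :: rest))).take (pats M v).length := by
                  rw [hpr, List.drop_left, List.take_left, hps]
                rw [hrot]
                exact ARB_rotate _ _ _ (by rw [hpr]; simp) hARring
            obtain ⟨d, hd, htrue, hrun⟩ := hARls
            have hplen : (pats (maxVal (c :: rest)) ls).length = ls.length := by simp [pats]
            rw [hplen] at hd hrun
            rw [stable k (maxVal (c :: rest)) hk d _ ls ce we hceM hmemls hd htrue hrun
              (by rw [hfuel]; have : d < ls.length := hd; omega)]
            rw [hceM]
            rfl
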